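-- pv_equiv track=rewrite | github.com/Hulyamr13/Python_Advanced_may_2023 | Algorithms with Python/Dynamic Programming - Exercise/Word Differences.py | find_min_operations
-- ===== SOURCE A (Python) =====
-- def find_min_operations(str1, str2):
--     m = len(str1)
--     n = len(str2)
--
--     # Create a 2D table to store the lengths of LCS
--     dp = [[0] * (n + 1) for _ in range(m + 1)]
--
--     # Fill the dp table
--     for i in range(1, m + 1):
--         for j in range(1, n + 1):
--             if str1[i - 1] == str2[j - 1]:
--                 dp[i][j] = 1 + dp[i - 1][j - 1]
--             else:
--                 dp[i][j] = max(dp[i - 1][j], dp[i][j - 1])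
--
--     # The minimum number of deletions and insertions
--     deletions = m - dp[m][n]
--     insertions = n - dp[m][n]
--
--     return deletions, insertions
-- ===== SOURCE B (Python) =====
-- def find_min_operations(str1, str2):
--     # Compute the minimal number of insert+delete edit operations directly
--     # (distance recurrence with identity boundary), then split it arithmetically.
--     m, n = len(str1), len(str2)
--     row = list(range(n + 1))
--     for i, c in enumerate(str1, 1):
--         new = [i]
--         for j, d in enumerate(str2, 1):
--             new.append(row[j - 1] if c == d else 1 + min(row[j], new[-1]))
--         row = new
--     dist = row[n]
--     return (m - n + dist) // 2, (n - m + dist) // 2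
-- ===== Notes on version B (the rewrite author's own statement) =====
-- stated objective: alternative
-- what changed: B abandons A's bottom-up LCS max-table: it computes the minimal insert+delete edit distance directly with a min-recurrence (identity boundary row, rolled over one row) and recovers (deletions, insertions) arithmetically as ((m-n+dist)//2, (n-m+dist)//2).
import Mathlib
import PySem

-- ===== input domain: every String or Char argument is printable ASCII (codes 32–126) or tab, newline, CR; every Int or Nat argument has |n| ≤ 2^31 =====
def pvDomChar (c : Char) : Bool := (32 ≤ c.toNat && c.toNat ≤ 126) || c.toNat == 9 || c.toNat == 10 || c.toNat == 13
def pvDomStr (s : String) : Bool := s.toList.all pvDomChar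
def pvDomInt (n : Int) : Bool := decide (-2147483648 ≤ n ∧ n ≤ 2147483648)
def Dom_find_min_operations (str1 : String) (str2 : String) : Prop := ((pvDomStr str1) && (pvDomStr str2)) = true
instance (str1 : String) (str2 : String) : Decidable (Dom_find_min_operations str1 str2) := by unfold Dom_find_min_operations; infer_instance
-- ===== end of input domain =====

-- B computes the minimal insert+delete edit distance directly (a min-recurrence with
-- identity boundary, kept as a rolling row) and recovers (deletions, insertions)
-- arithmetically, instead of A's bottom-up LCS max-table; an alternative algorithm
-- that also uses O(n) instead of O(m*n) space.

-- ===== PORT A =====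
-- Bottom-up LCS table, transliterated: range(1, m+1)/range(1, n+1) over nonnegative
-- indices is ported as List.range' 1 m / List.range' 1 n (Nat indices); in-range
-- Python indexing str[k] / dp[i][j] is ported with getD (always in range here, so exact).
def find_min_operations (str1 : String) (str2 : String) : Int × Int :=
  let s1 := str1.toList
  let s2 := str2.toList
  let m := s1.length
  let n := s2.length
  let dp0 : List (List Int) := List.replicate (m + 1) (List.replicate (n + 1) (0 : Int))
  let dp := (List.range' 1 m).foldl (fun dp i =>
    (List.range' 1 n).foldl (fun dp j =>
      dp.set i ((dp.getD i []).set j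
        (if s1.getD (i - 1) ' ' == s2.getD (j - 1) ' ' then
          1 + (dp.getD (i - 1) []).getD (j - 1) 0
        else
          max ((dp.getD (i - 1) []).getD j 0) ((dp.getD i []).getD (j - 1) 0)))) dp) dp0
  ((m : Int) - (dp.getD m []).getD n 0, (n : Int) - (dp.getD m []).getD n 0)

-- ===== PORT B =====
-- Rolling-row distance DP, transliterated from Source B: list(range(n+1)) is the mapped
-- range, enumerate(s, 1) is ported as List.zipIdx 1 (pair order (char, index)),
-- in-range row[j]/row[j-1] as getD, new[-1] on the always-nonempty new as getLastD,
-- and '//' as PySem.Int.floordiv.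
def find_min_operations_alt (str1 : String) (str2 : String) : Int × Int :=
  let s1 := str1.toList
  let s2 := str2.toList
  let m : Int := s1.length
  let n : Int := s2.length
  let row0 : List Int := (List.range (s2.length + 1)).map (fun j : Nat => (j : Int))
  let row := (s1.zipIdx 1).foldl (fun row ci =>
    (s2.zipIdx 1).foldl (fun new jd =>
      new ++ [if ci.1 == jd.1 then row.getD (jd.2 - 1) 0
              else 1 + min (row.getD jd.2 0) (new.getLastD 0)]) [(ci.2 : Int)]) row0
  let dist := row.getD s2.length 0
  (PySem.Int.floordiv (m - n + dist) 2, PySem.Int.floordiv (n - m + dist) 2)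

-- ===== PRECONDITION & SPEC =====
def Spec_find_min_operations (str1 : String) (str2 : String) (out : Int × Int) : Prop := out = find_min_operations_alt str1 str2
instance (str1 : String) (str2 : String) (out : Int × Int) : Decidable (Spec_find_min_operations str1 str2 out) := by unfold Spec_find_min_operations; infer_instance

-- ===== CLAIM (what is proved, stated in full; the proofs are below) =====
def Claim_equal_find_min_operations : Prop := ∀ (str1 : String) (str2 : String), Dom_find_min_operations str1 str2 → Spec_find_min_operations str1 str2 (find_min_operations str1 str2)

-- ===== LEMMAS AND PROOFS =====

-- Pure LCS-length recurrence (A's table values).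
def lcsSpec (s1 s2 : List Char) : Nat → Nat → Int
  | 0, _ => 0
  | _ + 1, 0 => 0
  | i + 1, j + 1 =>
    if s1.getD i ' ' == s2.getD j ' ' then 1 + lcsSpec s1 s2 i j
    else max (lcsSpec s1 s2 i (j + 1)) (lcsSpec s1 s2 (i + 1) j)
  termination_by i j => i + j

lemma lcsSpec_zero_left (s1 s2 : List Char) (j : Nat) : lcsSpec s1 s2 0 j = 0 := by
  rw [lcsSpec]

lemma lcsSpec_zero_right (s1 s2 : List Char) (i : Nat) : lcsSpec s1 s2 i 0 = 0 := by
  cases i <;> rw [lcsSpec]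

lemma lcsSpec_succ (s1 s2 : List Char) (i j : Nat) :
    lcsSpec s1 s2 (i + 1) (j + 1) =
      if s1.getD i ' ' == s2.getD j ' ' then 1 + lcsSpec s1 s2 i j
      else max (lcsSpec s1 s2 i (j + 1)) (lcsSpec s1 s2 (i + 1) j) := by
  rw [lcsSpec]

-- Pure insert+delete distance recurrence (B's row values).
def distSpec (s1 s2 : List Char) : Nat → Nat → Int
  | 0, j => (j : Int)
  | i + 1, 0 => (i : Int) + 1
  | i + 1, j + 1 =>
    if s1.getD i ' ' == s2.getD j ' ' then distSpec s1 s2 i j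
    else 1 + min (distSpec s1 s2 i (j + 1)) (distSpec s1 s2 (i + 1) j)
  termination_by i j => i + j

lemma distSpec_zero_left (s1 s2 : List Char) (j : Nat) : distSpec s1 s2 0 j = (j : Int) := by
  rw [distSpec]

lemma distSpec_zero_right (s1 s2 : List Char) (i : Nat) : distSpec s1 s2 i 0 = (i : Int) := by
  cases i with
  | zero => rw [distSpec]
  | succ i => rw [distSpec]; push_cast; ring

lemma distSpec_succ (s1 s2 : List Char) (i j : Nat) :
    distSpec s1 s2 (i + 1) (j + 1) =
      if s1.getD i ' ' == s2.getD j ' ' then distSpec s1 s2 i j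
      else 1 + min (distSpec s1 s2 i (j + 1)) (distSpec s1 s2 (i + 1) j) := by
  rw [distSpec]

-- The bridge: the distance is i + j minus twice the LCS length.
lemma dist_lcs (s1 s2 : List Char) :
    ∀ i j, distSpec s1 s2 i j = (i : Int) + j - 2 * lcsSpec s1 s2 i j := by
  intro i
  induction i with
  | zero =>
    intro j
    rw [distSpec_zero_left, lcsSpec_zero_left]
    ring
  | succ i ihi =>
    intro j
    induction j with
    | zero =>
      rw [distSpec_zero_right, lcsSpec_zero_right]
      push_cast; ring
    | succ j ihj =>
      rw [distSpec_succ, lcsSpec_succ]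
      by_cases h : s1.getD i ' ' == s2.getD j ' '
      · rw [if_pos h, if_pos h, ihi j]
        push_cast; ring
      · rw [if_neg h, if_neg h, ihi (j + 1), ihj]
        push_cast; omega

-- ---- B = distSpec: row invariant ----
lemma getD_map_range (f : Nat → Int) (k j : Nat) (h : j < k) :
    ((List.range k).map f).getD j 0 = f j := by
  simp [List.getD_eq_getElem?_getD, h]

lemma getLastD_map_range (f : Nat → Int) (k : Nat) :
    ((List.range (k + 1)).map f).getLastD 0 = f k := by
  rw [List.range_succ, List.map_append]
  simp

lemma b_inner (s1 s2 : List Char) (i : Nat) (c : Char) (hc : c = s1.getD i ' ')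
    (row : List Int)
    (hrow : row = (List.range (s2.length + 1)).map (fun j => distSpec s1 s2 i j)) :
    ∀ (ssuf : List Char) (t : Nat) (cur : List Int),
      t + ssuf.length = s2.length →
      s2.drop t = ssuf →
      cur = (List.range (t + 1)).map (fun j => distSpec s1 s2 (i + 1) j) →
      (ssuf.zipIdx (t + 1)).foldl (fun new jd =>
        new ++ [if c == jd.1 then row.getD (jd.2 - 1) 0
                else 1 + min (row.getD jd.2 0) (new.getLastD 0)]) cur =
      (List.range (s2.length + 1)).map (fun j => distSpec s1 s2 (i + 1) j) := by
  intro ssuf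
  induction ssuf with
  | nil =>
    intro t cur hlen hdrop hcur
    simp only [List.length_nil] at hlen
    subst hlen
    simpa using hcur
  | cons d rest ih =>
    intro t cur hlen hdrop hcur
    simp only [List.length_cons] at hlen
    rw [List.zipIdx_cons, List.foldl_cons]
    have hd : s2.getD t ' ' = d := by
      have h0 : s2[t]? = some d := by
        have := congrArg (fun l => l[0]?) hdrop
        simpa [List.getElem?_drop] using this
      simp [List.getD_eq_getElem?_getD, h0]
    have hrest : s2.drop (t + 1) = rest := by
      have := congrArg (List.drop 1) hdrop
      simpa [List.drop_drop] using this
    have htn : t < s2.length + 1 := by omega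
    have htn1 : t + 1 < s2.length + 1 := by omega
    have hnewcur :
        (cur ++ [if c == d then row.getD (t + 1 - 1) 0
                 else 1 + min (row.getD (t + 1) 0) (cur.getLastD 0)]) =
        (List.range (t + 1 + 1)).map (fun j => distSpec s1 s2 (i + 1) j) := by
      have hlast : cur.getLastD 0 = distSpec s1 s2 (i + 1) t := by
        rw [hcur]; exact getLastD_map_range _ _
      have hp1 : row.getD t 0 = distSpec s1 s2 i t := by
        rw [hrow]; exact getD_map_range _ _ _ htn
      have hp2 : row.getD (t + 1) 0 = distSpec s1 s2 i (t + 1) := by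
        rw [hrow]; exact getD_map_range _ _ _ htn1
      rw [List.range_succ, List.map_append, ← hcur]
      have hcond : (c == d) = (s1.getD i ' ' == s2.getD t ' ') := by rw [hc, hd]
      rw [hcond]
      congr 1
      simp only [Nat.add_sub_cancel, hp1, hp2, hlast, List.map_cons, List.map_nil]
      by_cases hcc : s1.getD i ' ' == s2.getD t ' '
      · rw [if_pos hcc, distSpec_succ, if_pos hcc]
      · rw [if_neg hcc, distSpec_succ, if_neg hcc]
    rw [hnewcur]
    exact ih (t + 1) _ (by omega) hrest rfl

lemma b_outer (s1 s2 : List Char) :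
    ∀ (ssuf : List Char) (t : Nat) (row : List Int),
      t + ssuf.length = s1.length →
      s1.drop t = ssuf →
      row = (List.range (s2.length + 1)).map (fun j => distSpec s1 s2 t j) →
      (ssuf.zipIdx (t + 1)).foldl (fun row ci =>
        (s2.zipIdx 1).foldl (fun new jd =>
          new ++ [if ci.1 == jd.1 then row.getD (jd.2 - 1) 0
                  else 1 + min (row.getD jd.2 0) (new.getLastD 0)]) [(ci.2 : Int)]) row =
      (List.range (s2.length + 1)).map (fun j => distSpec s1 s2 s1.length j) := by
  intro ssuf
  induction ssuf with
  | nil =>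
    intro t row hlen hdrop hrow
    simp only [List.length_nil] at hlen
    subst hlen
    simpa using hrow
  | cons c rest ih =>
    intro t row hlen hdrop hrow
    simp only [List.length_cons] at hlen
    rw [List.zipIdx_cons, List.foldl_cons]
    have hc : c = s1.getD t ' ' := by
      have h0 : s1[t]? = some c := by
        have := congrArg (fun l => l[0]?) hdrop
        simpa [List.getElem?_drop] using this
      simp [List.getD_eq_getElem?_getD, h0]
    have hrest : s1.drop (t + 1) = rest := by
      have := congrArg (List.drop 1) hdrop
      simpa [List.drop_drop] using this
    have hseed : [((t + 1 : Nat) : Int)] =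
        (List.range (0 + 1)).map (fun j => distSpec s1 s2 (t + 1) j) := by
      rw [show (0 + 1 : Nat) = 1 from rfl, List.range_one]
      simp only [List.map_cons, List.map_nil]
      rw [distSpec_zero_right]
    have hinner := b_inner s1 s2 t c hc row hrow s2 0 [((t + 1 : Nat) : Int)]
      (by omega) rfl hseed
    rw [hinner]
    exact ih (t + 1) _ (by omega) hrest rfl

lemma alt_eq_spec (str1 str2 : String) :
    find_min_operations_alt str1 str2 =
      ((str1.toList.length : Int) - lcsSpec str1.toList str2.toList str1.toList.length str2.toList.length,
       (str2.toList.length : Int) - lcsSpec str1.toList str2.toList str1.toList.length str2.toList.length) := by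
  have hrow0 : (List.range (str2.toList.length + 1)).map (fun j : Nat => (j : Int)) =
      (List.range (str2.toList.length + 1)).map (fun j => distSpec str1.toList str2.toList 0 j) :=
    (List.map_congr_left (fun j _ => (distSpec_zero_left str1.toList str2.toList j).symm))
  have h := b_outer str1.toList str2.toList str1.toList 0 _ (by omega) (by simp) hrow0
  simp only [Nat.zero_add] at h
  simp only [find_min_operations_alt]
  rw [h, getD_map_range _ _ _ (by omega), dist_lcs]
  have h2 : (0 < (2 : Int)) := by norm_num
  set m : Int := (str1.toList.length : Int)
  set n : Int := (str2.toList.length : Int)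
  set L : Int := lcsSpec str1.toList str2.toList str1.toList.length str2.toList.length
  have e1 : m - n + (m + n - 2 * L) = 2 * (m - L) := by ring
  have e2 : n - m + (m + n - 2 * L) = 2 * (n - L) := by ring
  rw [e1, e2, PySem.Int.floordiv_eq_ediv_of_pos h2, PySem.Int.floordiv_eq_ediv_of_pos h2,
    Int.mul_ediv_cancel_left _ (by norm_num), Int.mul_ediv_cancel_left _ (by norm_num)]

-- ---- A = lcsSpec: table invariant ----
lemma getD_set_self {α : Type} (l : List α) (i : Nat) (x d : α) (h : i < l.length) :
    (l.set i x).getD i d = x := by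
  simp [List.getD_eq_getElem?_getD, h]

lemma getD_set_ne {α : Type} (l : List α) (i r : Nat) (x d : α) (h : r ≠ i) :
    (l.set i x).getD r d = l.getD r d := by
  simp [List.getD_eq_getElem?_getD, List.getElem?_set_ne (Ne.symm h)]

lemma getD_replicate_zero (k j : Nat) : (List.replicate k (0 : Int)).getD j 0 = 0 := by
  simp only [List.getD_eq_getElem?_getD, List.getElem?_replicate]
  split <;> rfl

lemma getD_replicate_lt {α : Type} (k r : Nat) (x d : α) (h : r < k) :
    (List.replicate k x).getD r d = x := by
  simp [List.getD_eq_getElem?_getD, h]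

-- dp[i][j] as A's port reads it
def entry (dp : List (List Int)) (i j : Nat) : Int := (dp.getD i []).getD j 0

-- the inner-loop body of A's port
def stepJ (s1 s2 : List Char) (i : Nat) (dp : List (List Int)) (j : Nat) : List (List Int) :=
  dp.set i ((dp.getD i []).set j
    (if s1.getD (i - 1) ' ' == s2.getD (j - 1) ' ' then
      1 + (dp.getD (i - 1) []).getD (j - 1) 0
    else
      max ((dp.getD (i - 1) []).getD j 0) ((dp.getD i []).getD (j - 1) 0)))

lemma inner_loop (s1 s2 : List Char) (m n : Nat)
    (i : Nat) (hi1 : 1 ≤ i) (him : i ≤ m) :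
    ∀ (k j0 : Nat) (dp : List (List Int)), j0 + k = n →
      dp.length = m + 1 →
      (∀ r, r < m + 1 → (dp.getD r []).length = n + 1) →
      (∀ j, j ≤ n → entry dp (i - 1) j = lcsSpec s1 s2 (i - 1) j) →
      (∀ j, j ≤ j0 → entry dp i j = lcsSpec s1 s2 i j) →
      ∀ dp', dp' = (List.range' (j0 + 1) k).foldl (stepJ s1 s2 i) dp →
       (dp'.length = m + 1 ∧
       (∀ r, r < m + 1 → (dp'.getD r []).length = n + 1) ∧
       (∀ r, r ≠ i → dp'.getD r [] = dp.getD r []) ∧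
       (∀ j, j ≤ n → entry dp' i j = lcsSpec s1 s2 i j)) := by
  intro k
  induction k with
  | zero =>
    intro j0 dp hjk hlen hrow hprev hcur dp' hdp'
    subst hdp'
    exact ⟨hlen, hrow, fun r _ => rfl, fun j hj => hcur j (by omega)⟩
  | succ k ih =>
    intro j0 dp hjk hlen hrow hprev hcur dp' hdp'
    rw [List.range'_succ, List.foldl_cons] at hdp'
    have hidp : i < dp.length := by omega
    have hrowlen : (dp.getD i []).length = n + 1 := hrow i (by omega)
    have hjlt : j0 + 1 < (dp.getD i []).length := by omega
    have hval : entry (stepJ s1 s2 i dp (j0 + 1)) i (j0 + 1) = lcsSpec s1 s2 i (j0 + 1) := by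
      obtain ⟨i', rfl⟩ : ∃ i', i = i' + 1 := ⟨i - 1, by omega⟩
      have hprev1 := hprev j0 (by omega)
      have hprev2 := hprev (j0 + 1) (by omega)
      have hcur1 := hcur j0 le_rfl
      simp only [Nat.add_sub_cancel] at hprev1 hprev2
      unfold entry at hprev1 hprev2 hcur1 ⊢
      unfold stepJ
      simp only [Nat.add_sub_cancel]
      rw [getD_set_self _ _ _ _ hidp, getD_set_self _ _ _ _ hjlt, lcsSpec_succ]
      by_cases hc : s1.getD i' ' ' == s2.getD j0 ' '
      · rw [if_pos hc, if_pos hc, hprev1]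
      · rw [if_neg hc, if_neg hc, hprev2, hcur1]
    have hkeep : ∀ j, j ≠ j0 + 1 → entry (stepJ s1 s2 i dp (j0 + 1)) i j = entry dp i j := by
      intro j hj
      unfold entry stepJ
      rw [getD_set_self _ _ _ _ hidp, getD_set_ne _ _ _ _ _ hj]
    have hother : ∀ r, r ≠ i → (stepJ s1 s2 i dp (j0 + 1)).getD r [] = dp.getD r [] := by
      intro r hr
      unfold stepJ
      exact getD_set_ne _ _ _ _ _ hr
    exact ih (j0 + 1) (stepJ s1 s2 i dp (j0 + 1)) (by omega)
      (by unfold stepJ; simp [hlen])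
      (by
        intro r hr
        by_cases h : r = i
        · subst h
          unfold stepJ
          rw [getD_set_self _ _ _ _ hidp, List.length_set]
          exact hrowlen
        · rw [hother r h]; exact hrow r hr)
      (by
        intro j hj
        unfold entry
        rw [hother (i - 1) (by omega)]
        exact hprev j hj)
      (by
        intro j hj
        by_cases h : j = j0 + 1
        · subst h; exact hval
        · rw [hkeep j h]; exact hcur j (by omega))
      dp' hdp'
      |>.imp id (fun ⟨a, b, c⟩ => ⟨a, fun r hr => (b r hr).trans (hother r hr), c⟩)

lemma outer_loop (s1 s2 : List Char) (m n : Nat) :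
    ∀ (k i0 : Nat) (dp : List (List Int)), i0 + k = m →
      dp.length = m + 1 →
      (∀ r, r < m + 1 → (dp.getD r []).length = n + 1) →
      (∀ i, i ≤ i0 → ∀ j, j ≤ n → entry dp i j = lcsSpec s1 s2 i j) →
      (∀ i, i0 < i → i < m + 1 → dp.getD i [] = List.replicate (n + 1) (0 : Int)) →
      ∀ dp', dp' = (List.range' (i0 + 1) k).foldl
        (fun dp i => (List.range' 1 n).foldl (stepJ s1 s2 i) dp) dp →
      ∀ i, i ≤ m → ∀ j, j ≤ n → entry dp' i j = lcsSpec s1 s2 i j := by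
  intro k
  induction k with
  | zero =>
    intro i0 dp hik hlen hrow hdone hrest dp' hdp' i hi j hj
    subst hdp'
    exact hdone i (by omega) j hj
  | succ k ih =>
    intro i0 dp hik hlen hrow hdone hrest dp' hdp'
    rw [List.range'_succ, List.foldl_cons] at hdp'
    have hcur0 : ∀ j, j ≤ 0 → entry dp (i0 + 1) j = lcsSpec s1 s2 (i0 + 1) j := by
      intro j hj
      obtain rfl : j = 0 := by omega
      rw [lcsSpec_zero_right]
      unfold entry
      rw [hrest (i0 + 1) (by omega) (by omega)]
      exact getD_replicate_zero _ _
    have hprev : ∀ j, j ≤ n → entry dp (i0 + 1 - 1) j = lcsSpec s1 s2 (i0 + 1 - 1) j := by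
      intro j hj
      simpa using hdone i0 le_rfl j hj
    obtain ⟨a, b, c, d⟩ := inner_loop s1 s2 m n (i0 + 1) (by omega) (by omega)
      n 0 dp (by omega) hlen hrow hprev hcur0 _ rfl
    exact ih (i0 + 1) _ (by omega) a b
      (by
        intro i hi j hj
        by_cases h : i = i0 + 1
        · subst h; exact d j hj
        · unfold entry
          rw [c i h]
          exact hdone i (by omega) j hj)
      (by
        intro i hi him
        rw [c i (by omega)]
        exact hrest i (by omega) him)
      dp' hdp'

lemma table_entry (s1 s2 : List Char) :
    (((List.range' 1 s1.length).foldl (fun dp i =>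
        (List.range' 1 s2.length).foldl (stepJ s1 s2 i) dp)
      (List.replicate (s1.length + 1) (List.replicate (s2.length + 1) (0 : Int)))).getD
        s1.length []).getD s2.length 0 =
    lcsSpec s1 s2 s1.length s2.length := by
  have hinit : ∀ r, r < s1.length + 1 →
      ((List.replicate (s1.length + 1) (List.replicate (s2.length + 1) (0 : Int))).getD r []) =
        List.replicate (s2.length + 1) (0 : Int) := by
    intro r hr
    exact getD_replicate_lt _ _ _ _ hr
  exact outer_loop s1 s2 s1.length s2.length s1.length 0 _ (by omega)
    (by simp)
    (by intro r hr; rw [hinit r hr]; simp)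
    (by
      intro i hi j hj
      obtain rfl : i = 0 := by omega
      rw [lcsSpec_zero_left]
      unfold entry
      rw [hinit 0 (by omega)]
      exact getD_replicate_zero _ _)
    (fun i hi him => hinit i him)
    _ rfl s1.length le_rfl s2.length le_rfl

lemma a_eq_spec (str1 str2 : String) :
    find_min_operations str1 str2 =
      ((str1.toList.length : Int) - lcsSpec str1.toList str2.toList str1.toList.length str2.toList.length,
       (str2.toList.length : Int) - lcsSpec str1.toList str2.toList str1.toList.length str2.toList.length) := by
  have h := table_entry str1.toList str2.toList
  simp only [find_min_operations]
  unfold stepJ at h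
  rw [h]

-- ===== VERDICT (by name: the statement is the Claim_ definition above) =====
theorem find_min_operations_spec : Claim_equal_find_min_operations := by
  intro str1 str2 _
  unfold Spec_find_min_operations
  rw [a_eq_spec, alt_eq_spec]
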